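-- pv_equiv track=rewrite | github.com/yonsweng/ps | codeforces/1616/c.py | solve
-- ===== SOURCE A (Python) =====
-- def solve(n, a):
--     answer = 1
--
--
--     for i in range(1, n):
--         for s in range(0, n - 1):
--             ds = [(a[k] - a[s]) // j for j, k in enumerate(range(s + i, n, i), 1) if (a[k] - a[s]) % j == 0]
--             for d in ds:
--                 cnt = 1
--
--                 expected = a[s] + d
--                 for k in range(s + i, n, i):
--                     if expected < -100 or expected > 100:
--                         break
--                     if a[k] == expected:
--                         cnt += 1
--                     expected += d
--
--                 answer = max(answer, cnt)
--
--     return n - answer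
-- ===== SOURCE B (Python) =====
-- def solve(n, a):
--     answer = 1
--     for i in range(1, n):
--         for s in range(0, n - 1):
--             base = a[s]
--             counter = {}
--             # One pass over the stride: each position k at offset j implies a common
--             # difference d = (a[k]-base)/j when it divides; it is counted by A's inner
--             # re-scan exactly when base+d and a[k] both lie in [-100, 100] (the values
--             # in between are monotone, so A's break never hides a counted match).
--             for j, k in enumerate(range(s + i, n, i), 1):
--                 diff = a[k] - base
--                 if diff % j == 0:
--                     d = diff // j
--                     if -100 <= base + d <= 100 and -100 <= a[k] <= 100:
--                         counter[d] = counter.get(d, 0) + 1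
--             for c in counter.values():
--                 answer = max(answer, 1 + c)
--     return n - answer
-- ===== Notes on version B (the rewrite author's own statement) =====
-- stated objective: alternative
-- what changed: Per (i,s) stride, A builds the list of candidate differences and then re-scans the whole stride once per candidate; B makes a single pass that tallies each position's implied difference d=(a[k]-a[s])/j in a dict (counting only positions whose implied first and matched values lie in [-100,100], exactly what A's break admits) and takes the best tally, so the per-candidate re-scans disappear.
import Mathlib
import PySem

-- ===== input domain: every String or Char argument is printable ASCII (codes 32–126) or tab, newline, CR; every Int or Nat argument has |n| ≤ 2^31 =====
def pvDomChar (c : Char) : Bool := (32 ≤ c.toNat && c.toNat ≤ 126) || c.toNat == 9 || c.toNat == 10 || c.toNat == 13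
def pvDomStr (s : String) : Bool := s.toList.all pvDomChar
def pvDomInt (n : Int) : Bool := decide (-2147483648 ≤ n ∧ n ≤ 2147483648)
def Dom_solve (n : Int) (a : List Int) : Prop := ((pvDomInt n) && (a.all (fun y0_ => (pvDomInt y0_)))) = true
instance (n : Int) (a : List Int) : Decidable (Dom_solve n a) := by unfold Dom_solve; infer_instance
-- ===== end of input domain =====

-- B replaces A's per-candidate rescan of each stride by a single tallying pass per (i,s)
-- that counts each implied common difference d in a dict and takes the best count.

-- ===== PORT A =====
-- a[k] as a total function; all indices are in range under Pre_solve
def pvGet (a : List Int) (k : Int) : Int := PySem.List.pyGetD a k 0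

-- A's innermost 'for k in range(s+i, n, i)' loop, with its break
def innerA (a : List Int) (d : Int) : List Int → Int → Int → Int
  | [], cnt, _ => cnt
  | k :: ks, cnt, expected =>
    if expected < -100 ∨ expected > 100 then cnt
    else innerA a d ks (cnt + (if pvGet a k = expected then 1 else 0)) (expected + d)

-- the comprehension building ds (en = enumerate(range(s+i, n, i), 1), e0 = a[s])
def dsOf (a : List Int) (e0 : Int) (en : List (Int × Int)) : List Int :=
  en.filterMap (fun jk =>
    if PySem.Int.mod (pvGet a jk.2 - e0) jk.1 = 0
    then some (PySem.Int.floordiv (pvGet a jk.2 - e0) jk.1) else none)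

-- A's body for one (i, s) pair
def cellA (a : List Int) (n i s acc : Int) : Int :=
  (dsOf a (pvGet a s) (PySem.List.enumerate (PySem.List.pyRange (s + i) n i) 1)).foldl
    (fun answer d =>
      max answer (innerA a d (PySem.List.pyRange (s + i) n i) 1 (pvGet a s + d))) acc

def solve (n : Int) (a : List Int) : Int :=
  n - (PySem.List.pyRange 1 n 1).foldl
        (fun answer i =>
          (PySem.List.pyRange 0 (n - 1) 1).foldl (fun answer s => cellA a n i s answer) answer)
        1

-- ===== PORT B =====
-- B's tallying step: one enumerated stride element updates the dict of difference counts
def stepB (a : List Int) (base : Int) (c : PySem.Dict Int Int) (jk : Int × Int) : PySem.Dict Int Int :=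
  let diff := pvGet a jk.2 - base
  if PySem.Int.mod diff jk.1 = 0 then
    let d := PySem.Int.floordiv diff jk.1
    if -100 ≤ base + d ∧ base + d ≤ 100 ∧ -100 ≤ pvGet a jk.2 ∧ pvGet a jk.2 ≤ 100 then
      c.insert d (c.getD d 0 + 1)
    else c
  else c

-- B's body for one (i, s) pair: build the counter in one pass, then scan its values
def cellB (a : List Int) (n i s acc : Int) : Int :=
  (((PySem.List.enumerate (PySem.List.pyRange (s + i) n i) 1).foldl
      (stepB a (pvGet a s)) PySem.Dict.empty).values).foldl
    (fun answer c => max answer (1 + c)) acc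

def solve_alt (n : Int) (a : List Int) : Int :=
  n - (PySem.List.pyRange 1 n 1).foldl
        (fun answer i =>
          (PySem.List.pyRange 0 (n - 1) 1).foldl (fun answer s => cellB a n i s answer) answer)
        1

-- ===== PRECONDITION & SPEC =====
-- Pre_ excludes exactly the inputs where A raises IndexError: n ≥ 2 with fewer than n list elements.
def Pre_solve (n : Int) (a : List Int) : Prop := n ≤ 1 ∨ n ≤ (a.length : Int)
instance (n : Int) (a : List Int) : Decidable (Pre_solve n a) := by unfold Pre_solve; infer_instance

def pvWitness_solve : Int × List Int := (4, [1, 3, 5, 100])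

def Spec_solve (n : Int) (a : List Int) (out : Int) : Prop := out = solve_alt n a
instance (n : Int) (a : List Int) (out : Int) : Decidable (Spec_solve n a out) := by unfold Spec_solve; infer_instance

-- ===== CLAIM (what is proved, stated in full; the proofs are below) =====
def Claim_equal_solve : Prop := ∀ (n : Int) (a : List Int), Dom_solve n a → Pre_solve n a → Spec_solve n a (solve n a)

-- ===== LEMMAS AND PROOFS =====

-- the matches A's inner loop counts for difference d, as a predicate on an enumerated pair
def Pd (a : List Int) (e0 d : Int) (jk : Int × Int) : Bool :=
  decide (pvGet a jk.2 = e0 + jk.1 * d ∧ -100 ≤ e0 + d ∧ e0 + d ≤ 100 ∧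
          -100 ≤ pvGet a jk.2 ∧ pvGet a jk.2 ≤ 100)

-- e0 + j*d is monotone in j, so a middle value is bracketed by the endpoints
theorem pv_interp (e0 d j0 j : Int) (h1 : 1 ≤ j0) (h2 : j0 ≤ j)
    (hl1 : -100 ≤ e0 + d) (hl2 : e0 + d ≤ 100)
    (hr1 : -100 ≤ e0 + j * d) (hr2 : e0 + j * d ≤ 100) :
    -100 ≤ e0 + j0 * d ∧ e0 + j0 * d ≤ 100 := by
  by_cases hd : 0 ≤ d
  · have h3 : 0 ≤ (j0 - 1) * d := mul_nonneg (by omega) hd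
    have h4 : 0 ≤ (j - j0) * d := mul_nonneg (by omega) hd
    constructor <;> nlinarith
  · have hd' : d ≤ 0 := by omega
    have h3 : (j0 - 1) * d ≤ 0 := mul_nonpos_of_nonneg_of_nonpos (by omega) hd'
    have h4 : (j - j0) * d ≤ 0 := mul_nonpos_of_nonneg_of_nonpos (by omega) hd'
    constructor <;> nlinarith

theorem pv_fst_ge_of_mem_enumerate {α : Type} (xs : List α) (s : Int) (p : Int × α)
    (h : p ∈ PySem.List.enumerate xs s) : s ≤ p.1 := by
  rw [PySem.List.mem_enumerate_iff] at h
  obtain ⟨k, hk, rfl⟩ := h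
  simp only
  omega

-- A's inner loop counts exactly the Pd-matches of the remaining enumerated stride
theorem innerA_count (a : List Int) (e0 d : Int) :
    ∀ (ks : List Int) (j0 cnt : Int), 1 ≤ j0 →
      (∀ j', 1 ≤ j' → j' < j0 → -100 ≤ e0 + j' * d ∧ e0 + j' * d ≤ 100) →
      innerA a d ks cnt (e0 + j0 * d)
        = cnt + ((PySem.List.enumerate ks j0).countP (Pd a e0 d) : Int) := by
  intro ks
  induction ks with
  | nil => intro j0 cnt _ _; simp [innerA, PySem.List.enumerate_nil]
  | cons k ks ih =>
    intro j0 cnt h1 H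
    rw [PySem.List.enumerate_cons]
    by_cases hbr : e0 + j0 * d < -100 ∨ e0 + j0 * d > 100
    · rw [innerA, if_pos hbr]
      have hnone : ∀ p : Int × Int, j0 ≤ p.1 → ¬ (Pd a e0 d p = true) := by
        intro p hp hP
        simp only [Pd, decide_eq_true_eq] at hP
        obtain ⟨he, hl1, hl2, hr1, hr2⟩ := hP
        have hmid := pv_interp e0 d j0 p.1 h1 hp hl1 hl2 (by omega) (by omega)
        rcases hbr with hbr | hbr <;> linarith [hmid.1, hmid.2]
      have hz : ((j0, k) :: PySem.List.enumerate ks (j0 + 1)).countP (Pd a e0 d) = 0 := by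
        rw [List.countP_eq_zero]
        intro p hp
        rcases List.mem_cons.1 hp with rfl | hp
        · exact hnone _ le_rfl
        · exact hnone _ (by have := pv_fst_ge_of_mem_enumerate ks (j0 + 1) p hp; omega)
      rw [hz]; simp
    · rw [innerA, if_neg hbr]
      rw [not_or, not_lt, not_lt] at hbr
      have hed : -100 ≤ e0 + d ∧ e0 + d ≤ 100 := by
        rcases eq_or_lt_of_le h1 with h | h
        · have : e0 + d = e0 + j0 * d := by rw [← h]; ring
          rw [this]; exact hbr
        · simpa using H 1 le_rfl h
      have H' : ∀ j', 1 ≤ j' → j' < j0 + 1 → -100 ≤ e0 + j' * d ∧ e0 + j' * d ≤ 100 := by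
        intro j' hj1 hj2
        have : j' < j0 ∨ j' = j0 := by omega
        rcases this with h | h
        · exact H j' hj1 h
        · subst h; exact hbr
      have hrec := ih (j0 + 1) (cnt + (if pvGet a k = e0 + j0 * d then 1 else 0)) (by omega) H'
      have harg : e0 + j0 * d + d = e0 + (j0 + 1) * d := by ring
      rw [harg, hrec, List.countP_cons]
      have hPd : (Pd a e0 d (j0, k) = true) ↔ pvGet a k = e0 + j0 * d := by
        simp only [Pd, decide_eq_true_eq]
        constructor
        · exact fun h => h.1
        · intro h
          exact ⟨h, hed.1, hed.2, by rw [h]; exact hbr.1, by rw [h]; exact hbr.2⟩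
      by_cases hm : pvGet a k = e0 + j0 * d
      · rw [if_pos hm, if_pos (by simpa [hPd])]
        push_cast; ring
      · rw [if_neg hm, if_neg (by rw [hPd]; exact hm)]
        push_cast; ring

-- Pd, on a pair with positive index, is exactly B's insert condition with quotient d
theorem Pd_iff (a : List Int) (e0 d : Int) (x : Int × Int) (hx : 1 ≤ x.1) :
    Pd a e0 d x = true ↔
      (PySem.Int.mod (pvGet a x.2 - e0) x.1 = 0 ∧
       PySem.Int.floordiv (pvGet a x.2 - e0) x.1 = d ∧
       -100 ≤ e0 + d ∧ e0 + d ≤ 100 ∧ -100 ≤ pvGet a x.2 ∧ pvGet a x.2 ≤ 100) := by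
  simp only [Pd, decide_eq_true_eq]
  constructor
  · rintro ⟨he, h1, h2, h3, h4⟩
    have hdvd : x.1 ∣ (pvGet a x.2 - e0) := ⟨d, by rw [he]; ring⟩
    have hm : PySem.Int.mod (pvGet a x.2 - e0) x.1 = 0 :=
      (PySem.Int.mod_eq_zero_iff_dvd _ _).2 hdvd
    have hf := PySem.Int.floordiv_mul_add_mod (pvGet a x.2 - e0) x.1
    rw [hm, add_zero] at hf
    have hq : PySem.Int.floordiv (pvGet a x.2 - e0) x.1 = d := by
      have hx0 : x.1 ≠ 0 := by omega
      have h' : PySem.Int.floordiv (pvGet a x.2 - e0) x.1 * x.1 = d * x.1 := by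
        rw [hf, he]; ring
      exact mul_right_cancel₀ hx0 h'
    exact ⟨hm, hq, h1, h2, h3, h4⟩
  · rintro ⟨hm, hq, h1, h2, h3, h4⟩
    have hf := PySem.Int.floordiv_mul_add_mod (pvGet a x.2 - e0) x.1
    rw [hm, add_zero, hq] at hf
    exact ⟨by linarith [hf, mul_comm x.1 d], h1, h2, h3, h4⟩

-- B's counter: lookup of d is the number of Pd-matches tallied so far
theorem counter_getD (a : List Int) (e0 d : Int) :
    ∀ (l : List (Int × Int)), (∀ x ∈ l, 1 ≤ x.1) → ∀ c : PySem.Dict Int Int,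
      (l.foldl (stepB a e0) c).getD d 0 = c.getD d 0 + (l.countP (Pd a e0 d) : Int) := by
  intro l
  induction l with
  | nil => intro _ c; simp
  | cons x l ih =>
    intro hall c
    have hx1 : 1 ≤ x.1 := hall x (List.mem_cons_self)
    have hall' : ∀ y ∈ l, 1 ≤ y.1 := fun y hy => hall y (List.mem_cons_of_mem _ hy)
    rw [List.foldl_cons, List.countP_cons]
    simp only [stepB]
    by_cases hm : PySem.Int.mod (pvGet a x.2 - e0) x.1 = 0
    · rw [if_pos hm]
      by_cases hr : -100 ≤ e0 + PySem.Int.floordiv (pvGet a x.2 - e0) x.1 ∧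
          e0 + PySem.Int.floordiv (pvGet a x.2 - e0) x.1 ≤ 100 ∧
          -100 ≤ pvGet a x.2 ∧ pvGet a x.2 ≤ 100
      · rw [if_pos hr]
        by_cases hdd : PySem.Int.floordiv (pvGet a x.2 - e0) x.1 = d
        · have hPx : Pd a e0 d x = true := by
            rw [Pd_iff a e0 d x hx1]
            refine ⟨hm, hdd, ?_, ?_, hr.2.2.1, hr.2.2.2⟩ <;> rw [← hdd]
            · exact hr.1
            · exact hr.2.1
          rw [ih hall', hdd, PySem.Dict.getD_insert_self, if_pos hPx]
          push_cast; ring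
        · have hPx : ¬ (Pd a e0 d x = true) := by
            rw [Pd_iff a e0 d x hx1]
            rintro ⟨_, h2, _⟩; exact hdd h2
          rw [ih hall', PySem.Dict.getD_insert_of_ne _ _ _ (fun h => hdd h.symm), if_neg hPx]
          push_cast; ring
      · rw [if_neg hr]
        have hPx : ¬ (Pd a e0 d x = true) := by
          rw [Pd_iff a e0 d x hx1]
          rintro ⟨_, hq, h3, h4, h5, h6⟩
          exact hr ⟨by rw [hq]; exact h3, by rw [hq]; exact h4, h5, h6⟩
        rw [ih hall', if_neg hPx]
        push_cast; ring
    · rw [if_neg hm]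
      have hPx : ¬ (Pd a e0 d x = true) := by
        rw [Pd_iff a e0 d x hx1]
        rintro ⟨h1, _⟩; exact hm h1
      rw [ih hall', if_neg hPx]
      push_cast; ring

-- B's counter contains d exactly when some Pd-match was tallied
theorem counter_contains (a : List Int) (e0 d : Int) :
    ∀ (l : List (Int × Int)), (∀ x ∈ l, 1 ≤ x.1) → ∀ c : PySem.Dict Int Int,
      ((l.foldl (stepB a e0) c).contains d = true ↔
        (c.contains d = true ∨ l.countP (Pd a e0 d) ≠ 0)) := by
  intro l
  induction l with
  | nil => intro _ c; simp
  | cons x l ih =>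
    intro hall c
    have hx1 : 1 ≤ x.1 := hall x (List.mem_cons_self)
    have hall' : ∀ y ∈ l, 1 ≤ y.1 := fun y hy => hall y (List.mem_cons_of_mem _ hy)
    rw [List.foldl_cons, List.countP_cons]
    simp only [stepB]
    by_cases hm : PySem.Int.mod (pvGet a x.2 - e0) x.1 = 0
    · rw [if_pos hm]
      by_cases hr : -100 ≤ e0 + PySem.Int.floordiv (pvGet a x.2 - e0) x.1 ∧
          e0 + PySem.Int.floordiv (pvGet a x.2 - e0) x.1 ≤ 100 ∧
          -100 ≤ pvGet a x.2 ∧ pvGet a x.2 ≤ 100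
      · rw [if_pos hr]
        by_cases hdd : PySem.Int.floordiv (pvGet a x.2 - e0) x.1 = d
        · have hPx : Pd a e0 d x = true := by
            rw [Pd_iff a e0 d x hx1]
            refine ⟨hm, hdd, ?_, ?_, hr.2.2.1, hr.2.2.2⟩ <;> rw [← hdd]
            · exact hr.1
            · exact hr.2.1
          rw [ih hall', PySem.Dict.contains_insert, if_pos hPx]
          subst hdd
          simp
        · have hPx : ¬ (Pd a e0 d x = true) := by
            rw [Pd_iff a e0 d x hx1]
            rintro ⟨_, h2, _⟩; exact hdd h2
          rw [ih hall', PySem.Dict.contains_insert, if_neg hPx]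
          have : (d == PySem.Int.floordiv (pvGet a x.2 - e0) x.1) = false := by
            simp; exact fun h => hdd h.symm
          rw [this]
          simp
      · rw [if_neg hr]
        have hPx : ¬ (Pd a e0 d x = true) := by
          rw [Pd_iff a e0 d x hx1]
          rintro ⟨_, hq, h3, h4, h5, h6⟩
          exact hr ⟨by rw [hq]; exact h3, by rw [hq]; exact h4, h5, h6⟩
        rw [ih hall', if_neg hPx]
        simp
    · rw [if_neg hm]
      have hPx : ¬ (Pd a e0 d x = true) := by
        rw [Pd_iff a e0 d x hx1]
        rintro ⟨h1, _⟩; exact hm h1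
      rw [ih hall', if_neg hPx]
      simp

theorem counter_nodup (a : List Int) (e0 : Int) :
    ∀ (l : List (Int × Int)) (c : PySem.Dict Int Int), c.keys.Nodup →
      (l.foldl (stepB a e0) c).keys.Nodup := by
  intro l
  induction l with
  | nil => intro c h; simpa
  | cons x l ih =>
    intro c h
    rw [List.foldl_cons]
    apply ih
    simp only [stepB]
    split_ifs with h1 h2
    · exact PySem.Dict.nodup_keys_insert _ _ _ h
    · exact h
    · exact h

theorem pv_foldl_max_le (l : List Int) :
    ∀ (acc B : Int), acc ≤ B → (∀ y ∈ l, y ≤ B) → l.foldl max acc ≤ B := by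
  induction l with
  | nil => intro acc B h _; simpa
  | cons x l ih =>
    intro acc B h hall
    rw [List.foldl_cons]
    exact ih _ _ (max_le h (hall x (List.mem_cons_self))) (fun y hy => hall y (List.mem_cons_of_mem _ hy))

theorem pv_foldl_max_congr (acc : Int) (l1 l2 : List Int)
    (h1 : ∀ x ∈ l1, x ≤ acc ∨ x ∈ l2) (h2 : ∀ x ∈ l2, x ≤ acc ∨ x ∈ l1) :
    l1.foldl max acc = l2.foldl max acc := by
  apply le_antisymm
  · refine pv_foldl_max_le l1 acc _ (PySem.List.le_foldl_max l2 acc).1 (fun y hy => ?_)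
    rcases h1 y hy with h | h
    · exact le_trans h (PySem.List.le_foldl_max l2 acc).1
    · exact (PySem.List.le_foldl_max l2 acc).2 y h
  · refine pv_foldl_max_le l2 acc _ (PySem.List.le_foldl_max l1 acc).1 (fun y hy => ?_)
    rcases h2 y hy with h | h
    · exact le_trans h (PySem.List.le_foldl_max l1 acc).1
    · exact (PySem.List.le_foldl_max l1 acc).2 y h

theorem pv_foldl_ge {β : Type} (f : Int → β → Int) (h : ∀ acc b, acc ≤ f acc b) :
    ∀ (l : List β) (acc : Int), acc ≤ l.foldl f acc := by
  intro l
  induction l with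
  | nil => intro acc; simp
  | cons x l ih =>
    intro acc
    rw [List.foldl_cons]
    exact le_trans (h acc x) (ih (f acc x))

theorem pv_foldl_congr_ge_one {β : Type} (f g : Int → β → Int)
    (h : ∀ acc b, 1 ≤ acc → f acc b = g acc b ∧ acc ≤ f acc b) :
    ∀ (l : List β) (acc : Int), 1 ≤ acc → l.foldl f acc = l.foldl g acc := by
  intro l
  induction l with
  | nil => intro acc _; rfl
  | cons x l ih =>
    intro acc hacc
    rw [List.foldl_cons, List.foldl_cons, (h acc x hacc).1.symm]
    exact ih (f acc x) (le_trans hacc (h acc x hacc).2)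

-- one (i, s) cell: A's rescans and B's counter give the same running maximum
theorem cell_eq (a : List Int) (n i s acc : Int) (hacc : 1 ≤ acc) :
    cellA a n i s acc = cellB a n i s acc := by
  unfold cellA cellB
  set e0 := pvGet a s with he0
  set ks := PySem.List.pyRange (s + i) n i with hks
  set en := PySem.List.enumerate ks 1 with hen
  set counter := en.foldl (stepB a e0) PySem.Dict.empty with hcounter
  have hfst : ∀ x ∈ en, 1 ≤ x.1 := fun x hx => pv_fst_ge_of_mem_enumerate ks 1 x hx
  have hcm : ∀ d, counter.getD d 0 = (en.countP (Pd a e0 d) : Int) := by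
    intro d
    rw [hcounter, counter_getD a e0 d en hfst, PySem.Dict.getD_empty]
    ring
  have hcont : ∀ d, counter.contains d = true ↔ en.countP (Pd a e0 d) ≠ 0 := by
    intro d
    rw [hcounter, counter_contains a e0 d en hfst]
    have : (PySem.Dict.empty : PySem.Dict Int Int).contains d = true ↔ False := by
      rw [PySem.Dict.contains_iff_mem_keys, PySem.Dict.keys_empty]; simp
    rw [this]; tauto
  have hnd : counter.keys.Nodup := by
    rw [hcounter]
    exact counter_nodup a e0 en PySem.Dict.empty (by rw [PySem.Dict.keys_empty]; exact List.nodup_nil)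
  have hvals : counter.values = counter.keys.map (fun k => counter.getD k 0) :=
    PySem.Dict.values_eq_map_keys counter hnd 0
  have hA : ∀ d, innerA a d ks 1 (e0 + d) = 1 + (en.countP (Pd a e0 d) : Int) := by
    intro d
    have := innerA_count a e0 d ks 1 1 le_rfl (by intro j' h1 h2; omega)
    rw [← hen] at this
    simpa using this
  have hLA : List.foldl (fun answer d => max answer (innerA a d ks 1 (e0 + d))) acc (dsOf a e0 en)
      = List.foldl max acc ((dsOf a e0 en).map (fun d => innerA a d ks 1 (e0 + d))) :=
    List.foldl_map.symm
  have hLB : List.foldl (fun answer c => max answer (1 + c)) acc counter.values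
      = List.foldl max acc (counter.values.map (fun c => 1 + c)) :=
    List.foldl_map.symm
  rw [hLA, hLB]
  apply pv_foldl_max_congr
  · intro x hx
    rw [List.mem_map] at hx
    obtain ⟨d, hd, rfl⟩ := hx
    rw [hA d]
    by_cases h0 : en.countP (Pd a e0 d) = 0
    · left; rw [h0]; simp; omega
    · right
      have hk : d ∈ counter.keys := (PySem.Dict.contains_iff_mem_keys _ _).1 ((hcont d).2 h0)
      rw [hvals, List.map_map, List.mem_map]
      exact ⟨d, hk, by simp [hcm d]⟩
  · intro y hy
    rw [hvals, List.map_map, List.mem_map] at hy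
    obtain ⟨d, hk, rfl⟩ := hy
    have hc : en.countP (Pd a e0 d) ≠ 0 :=
      (hcont d).1 ((PySem.Dict.contains_iff_mem_keys _ _).2 hk)
    right
    have hex : ∃ x ∈ en, Pd a e0 d x = true := by
      rcases List.countP_pos_iff.1 (Nat.pos_of_ne_zero hc) with ⟨x, hx, hPx⟩
      exact ⟨x, hx, hPx⟩
    obtain ⟨x, hxen, hPx⟩ := hex
    rw [Pd_iff a e0 d x (hfst x hxen)] at hPx
    rw [List.mem_map]
    refine ⟨d, ?_, by simp [hA d, hcm d]⟩
    unfold dsOf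
    rw [List.mem_filterMap]
    exact ⟨x, hxen, by rw [if_pos hPx.1, hPx.2.1]⟩

theorem cellA_ge (a : List Int) (n i s acc : Int) : acc ≤ cellA a n i s acc := by
  unfold cellA
  exact pv_foldl_ge _ (fun acc b => le_max_left _ _) _ acc

theorem solve_spec : Claim_equal_solve := by
  unfold Claim_equal_solve
  intro n a _ _
  unfold Spec_solve solve solve_alt
  have h : (PySem.List.pyRange 1 n 1).foldl
      (fun answer i => (PySem.List.pyRange 0 (n - 1) 1).foldl (fun answer s => cellA a n i s answer) answer) 1
      = (PySem.List.pyRange 1 n 1).foldl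
      (fun answer i => (PySem.List.pyRange 0 (n - 1) 1).foldl (fun answer s => cellB a n i s answer) answer) 1 := by
    apply pv_foldl_congr_ge_one _ _ _ _ 1 le_rfl
    intro acc i hacc
    constructor
    · apply pv_foldl_congr_ge_one _ _ _ _ acc hacc
      intro acc2 s hacc2
      exact ⟨cell_eq a n i s acc2 hacc2, cellA_ge a n i s acc2⟩
    · exact pv_foldl_ge _ (fun acc2 s => cellA_ge a n i s acc2) _ acc
  rw [h]
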